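-- pv_equiv track=rewrite | github.com/DIAGNijmegen/pathology-whole-slide-packer | wsipack/utils/cool_utils.py | dict_of_lists_to_dicts
-- ===== SOURCE A (Python) =====
-- def dict_of_lists_to_dicts(dict_of_lists):
--     lens = list(set([len(v) for v in dict_of_lists.values()]))
--     if len(lens)!=1:
--         raise ValueError('lists have different lengths: %s' % str(lens))
--     n = lens[0]
--
--     dicts = []
--     for i in range(n):
--         di = {}
--         dicts.append(di)
--         for k,vals in dict_of_lists.items():
--             di[k] = vals[i]
--
--     return dicts
-- ===== SOURCE B (Python) =====
-- def dict_of_lists_to_dicts(dict_of_lists):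
--     lens = list(set(len(v) for v in dict_of_lists.values()))
--     if len(lens) != 1:
--         raise ValueError('lists have different lengths: %s' % str(lens))
--     # Destructive stack consumption: reverse each value list once into a stack,
--     # then pop one element per key per row until the stacks are exhausted.
--     stacks = [(k, list(reversed(v))) for k, v in dict_of_lists.items()]
--     dicts = []
--     while stacks[0][1]:
--         dicts.append({k: v.pop() for k, v in stacks})
--     return dicts
-- ===== Notes on version B (the rewrite author's own statement) =====
-- stated objective: alternative
-- what changed: Replaces A's index-driven nested loop (for i in range(n): di[k]=vals[i]) by destructive stack consumption: each value list is reversed once into a stack and every row is built by popping one element per key until the first stack is exhausted, so no positional indexing remains.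
import Mathlib
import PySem

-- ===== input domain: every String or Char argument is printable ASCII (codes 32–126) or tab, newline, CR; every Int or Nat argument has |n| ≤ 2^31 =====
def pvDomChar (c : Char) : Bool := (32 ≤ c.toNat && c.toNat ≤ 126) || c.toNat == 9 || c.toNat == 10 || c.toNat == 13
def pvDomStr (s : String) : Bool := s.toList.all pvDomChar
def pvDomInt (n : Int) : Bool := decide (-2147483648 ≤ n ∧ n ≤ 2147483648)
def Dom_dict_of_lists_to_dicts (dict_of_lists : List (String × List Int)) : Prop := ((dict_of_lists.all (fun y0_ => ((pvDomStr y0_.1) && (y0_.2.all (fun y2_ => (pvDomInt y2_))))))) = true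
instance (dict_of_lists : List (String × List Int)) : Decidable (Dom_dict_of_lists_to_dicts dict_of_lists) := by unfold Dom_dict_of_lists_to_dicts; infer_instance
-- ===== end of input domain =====

-- B replaces A's index-driven nested loop by destructive stack consumption (reverse
-- each value list once, pop one element per key per row); same cost, different traversal.

-- ===== PORT A =====
def dict_of_lists_to_dicts (dict_of_lists : List (String × List Int)) : List (List (String × Int)) :=
  let lens := PySem.Set.ofList (dict_of_lists.map (fun p => (p.2.length : Int)))
  if lens.length ≠ 1 then []  -- Python raises ValueError here; outside Pre_
  else
    let n := PySem.List.pyGetD lens 0 0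
    (PySem.List.pyRange 0 n 1).map (fun i =>
      (dict_of_lists.foldl
        (fun di p => PySem.Dict.insert di p.1 (PySem.List.pyGetD p.2 i 0))
        PySem.Dict.empty).items)

-- ===== PORT B =====
-- the while loop: pop the last element of every stack to form a row, until the first stack is empty
def pvPopRows (sts : List (String × List Int)) : List (List (String × Int)) :=
  if h : ((sts.headD ("", [])).2) ≠ [] then
    ((sts.foldl
        (fun di p => PySem.Dict.insert di p.1 (p.2.getLast?.getD 0))
        PySem.Dict.empty).items)
      :: pvPopRows (sts.map (fun p => (p.1, p.2.dropLast)))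
  else []
termination_by ((sts.headD ("", [])).2).length
decreasing_by
  rcases sts with _ | ⟨c, t⟩
  · simp at h
  · simp only [List.headD_cons] at h
    simp only [List.attach_cons, List.map_cons, List.headD_cons, List.length_dropLast]
    have := List.length_pos_iff.mpr h
    omega

def dict_of_lists_to_dicts_alt (dict_of_lists : List (String × List Int)) : List (List (String × Int)) :=
  let lens := PySem.Set.ofList (dict_of_lists.map (fun p => (p.2.length : Int)))
  if lens.length ≠ 1 then []  -- Python raises ValueError here; outside Pre_
  else
    let sts := dict_of_lists.map (fun p => (p.1, p.2.reverse))
    pvPopRows sts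

-- ===== PRECONDITION & SPEC =====
-- Pre_ excludes exactly the inputs where A raises ValueError: the empty dict and
-- dicts whose value lists do not all have the same length (B raises there too).
def Pre_dict_of_lists_to_dicts (dict_of_lists : List (String × List Int)) : Prop :=
  dict_of_lists ≠ [] ∧ ∀ p ∈ dict_of_lists, ∀ q ∈ dict_of_lists, p.2.length = q.2.length
instance (dict_of_lists : List (String × List Int)) : Decidable (Pre_dict_of_lists_to_dicts dict_of_lists) := by unfold Pre_dict_of_lists_to_dicts; infer_instance

def pvWitness_dict_of_lists_to_dicts : (List (String × List Int)) := [("a", [1, 2]), ("b", [3, 4])]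

def Spec_dict_of_lists_to_dicts (dict_of_lists : List (String × List Int)) (out : List (List (String × Int))) : Prop := out = dict_of_lists_to_dicts_alt dict_of_lists
instance (dict_of_lists : List (String × List Int)) (out : List (List (String × Int))) : Decidable (Spec_dict_of_lists_to_dicts dict_of_lists out) := by unfold Spec_dict_of_lists_to_dicts; infer_instance

-- ===== CLAIM (what is proved, stated in full; the proofs are below) =====
def Claim_equal_dict_of_lists_to_dicts : Prop := ∀ (dict_of_lists : List (String × List Int)), Dom_dict_of_lists_to_dicts dict_of_lists → Pre_dict_of_lists_to_dicts dict_of_lists → Spec_dict_of_lists_to_dicts dict_of_lists (dict_of_lists_to_dicts dict_of_lists)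

-- ===== LEMMAS AND PROOFS =====

-- A's row i, as a named abbreviation for the proofs
def pvRowA (d : List (String × List Int)) (i : Nat) : List (String × Int) :=
  (d.foldl (fun di p => PySem.Dict.insert di p.1 (p.2.getD i 0)) PySem.Dict.empty).items

theorem pv_foldl_add_const {l : List Int} {a : Int} (h : ∀ x ∈ l, x = a) :
    l.foldl PySem.Set.add [a] = [a] := by
  induction l with
  | nil => rfl
  | cons x t ih =>
    have hx : x = a := h x (by simp)
    subst hx
    have : PySem.Set.add [x] x = [x] := by simp [PySem.Set.add, PySem.Set.contains]
    simp only [List.foldl_cons, this]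
    exact ih (fun y hy => h y (by simp [hy]))

theorem pv_ofList_const {l : List Int} {a : Int} (h : ∀ x ∈ l, x = a) :
    PySem.Set.ofList (a :: l) = [a] := by
  rw [PySem.Set.ofList_eq_foldl]
  simp only [List.foldl_cons]
  have : PySem.Set.add [] a = [a] := by simp [PySem.Set.add, PySem.Set.contains]
  rw [this]
  exact pv_foldl_add_const h

theorem pv_row_map (d : List (String × List Int)) (g : List Int → List Int)
    (f : List Int → Int) (acc : PySem.Dict String Int) :
    ((d.map (fun p => (p.1, g p.2))).foldl
        (fun di p => PySem.Dict.insert di p.1 (f p.2)) acc)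
      = d.foldl (fun di p => PySem.Dict.insert di p.1 (f (g p.2))) acc := by
  induction d generalizing acc with
  | nil => rfl
  | cons c t ih => simp only [List.map_cons, List.foldl_cons, ih]

theorem pv_row_congr (d : List (String × List Int)) (f g : String × List Int → Int)
    (h : ∀ p ∈ d, f p = g p) (acc : PySem.Dict String Int) :
    d.foldl (fun di p => PySem.Dict.insert di p.1 (f p)) acc
      = d.foldl (fun di p => PySem.Dict.insert di p.1 (g p)) acc := by
  induction d generalizing acc with
  | nil => rfl
  | cons c t ih =>
    simp only [List.foldl_cons, h c (by simp)]
    exact ih (fun p hp => h p (by simp [hp])) _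

theorem pv_popRows_eq (m : Nat) (d : List (String × List Int)) (hne : d ≠ [])
    (hlen : ∀ p ∈ d, p.2.length = m) :
    pvPopRows (d.map (fun p => (p.1, p.2.reverse))) = (List.range m).map (pvRowA d) := by
  induction m generalizing d with
  | zero =>
    rcases d with _ | ⟨c, t⟩
    · exact absurd rfl hne
    have hc : c.2 = [] := List.length_eq_zero_iff.mp (hlen c (by simp))
    rw [pvPopRows]
    rw [dif_neg (by simp [hc])]
    simp
  | succ m ih =>
    rcases d with _ | ⟨c, t⟩
    · exact absurd rfl hne
    have hc : c.2 ≠ [] := by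
      intro he; have := hlen c (by simp); simp [he] at this
    rw [pvPopRows]
    rw [dif_pos (by simpa using hc)]
    have hmap : ((c :: t).map (fun p => (p.1, p.2.reverse))).map
        (fun p : String × List Int => (p.1, p.2.dropLast))
        = ((c :: t).map (fun p => (p.1, p.2.tail))).map (fun p => (p.1, p.2.reverse)) := by
      simp only [List.map_map, Function.comp_def]
      apply List.map_congr_left
      intro a _
      simp [List.dropLast_reverse]
    rw [hmap]
    rw [ih ((c :: t).map (fun p => (p.1, p.2.tail))) (by simp)
        (by intro p hp
            simp only [List.mem_map] at hp
            obtain ⟨q, hq, rfl⟩ := hp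
            have := hlen q hq
            simp only [List.length_tail, this]
            omega)]
    rw [List.range_succ_eq_map]
    simp only [List.map_cons, List.map_map, Function.comp_def]
    congr 1
    · have h1 := pv_row_map (c :: t) (fun v => v.reverse)
        (fun v => v.getLast?.getD 0) PySem.Dict.empty
      simp only [List.map_cons] at h1
      rw [h1]
      apply congrArg
      apply pv_row_congr
      intro p hp
      have hq : p.2 ≠ [] := by
        intro he; have := hlen p hp; simp [he] at this
      rw [List.getLast?_reverse]
      obtain ⟨k, v⟩ := p
      cases v <;> simp
    · apply List.map_congr_left
      intro i _
      unfold pvRowA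
      have h1 := pv_row_map (c :: t) (fun v => v.tail)
        (fun v => v.getD i 0) PySem.Dict.empty
      simp only [List.map_cons] at h1
      rw [h1]
      apply congrArg
      apply pv_row_congr
      intro p hp
      rcases p.2 with _ | ⟨x, xs⟩ <;> simp

-- ===== VERDICT (by name: the statement is the Claim_ definition above) =====
theorem dict_of_lists_to_dicts_spec : Claim_equal_dict_of_lists_to_dicts := by
  intro d _ hpre
  obtain ⟨hne, heq⟩ := hpre
  rcases d with _ | ⟨p0, rest⟩
  · exact absurd rfl hne
  unfold Spec_dict_of_lists_to_dicts dict_of_lists_to_dicts dict_of_lists_to_dicts_alt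
  have hlens : PySem.Set.ofList (((p0 :: rest).map (fun p => (p.2.length : Int)))) = [(p0.2.length : Int)] := by
    simp only [List.map_cons]
    apply pv_ofList_const
    intro x hx
    simp only [List.mem_map] at hx
    obtain ⟨q, hq, rfl⟩ := hx
    exact_mod_cast congrArg (fun n : Nat => (n : Int)) (heq q (by simp [hq]) p0 (by simp))
  simp only [hlens]
  rw [if_neg (show ¬([(p0.2.length : Int)].length ≠ 1) by simp),
      if_neg (show ¬([(p0.2.length : Int)].length ≠ 1) by simp)]
  rw [pv_popRows_eq p0.2.length _ (by simp) (fun p hp => heq p hp p0 (by simp))]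
  rw [show PySem.List.pyGetD [(p0.2.length : Int)] 0 0 = (p0.2.length : Int) by simp [PySem.List.pyGetD]]
  rw [PySem.List.pyRange_one]
  rw [show ((p0.2.length : Int) - 0).toNat = p0.2.length by simp]
  simp only [List.map_map, Function.comp_def, zero_add, PySem.List.pyGetD_natCast]
  apply List.map_congr_left
  intro i _
  simp [pvRowA]
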